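-- pv_equiv track=rewrite | github.com/Gayeon6423/Improvement-of-the-Coreference-Resolution-model | augmentation/utils_filtering.py | adjust_offsets
-- ===== SOURCE A (Python) =====
-- def adjust_offsets(coreference_offsets, original_words, updated_words):
--     """
--     Adjusts the coreference offsets based on additional words in the updated words list.
--
--     Args:
--     coreference_offsets (list of lists): Original offsets for each coreference word cluster.
--     original_words (list of lists): Original coreference word clusters before modification.
--     updated_words (list of lists): Updated coreference word clusters after modification.
--
--     Returns:
--     list of lists: Adjusted offsets.
--     """
--     adjusted_offsets = []
--     cumulative_offset = 0
--
--     for i, (original, updated) in enumerate(zip(original_words, updated_words)):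
--         # Calculate the difference in length due to added words
--         added_words_count = len(updated) - len(original)
--
--         # Adjust the starting and ending offsets by the cumulative offset
--         start_offset, end_offset = coreference_offsets[i]
--         start_offset += cumulative_offset
--         end_offset += cumulative_offset + added_words_count
--
--         # Append the adjusted offsets
--         adjusted_offsets.append([start_offset, end_offset])
--
--         # Update the cumulative offset
--         cumulative_offset += added_words_count
--
--     return adjusted_offsets
-- ===== SOURCE B (Python) =====
-- def adjust_offsets(coreference_offsets, original_words, updated_words):
--     # Closed form, no running state: the shift in front of cluster k is the total
--     # word count of the updated clusters before k minus that of the originals.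
--     def shift(k):
--         return sum(len(u) for u in updated_words[:k]) - sum(len(o) for o in original_words[:k])
--
--     n = min(len(original_words), len(updated_words))
--     return [[coreference_offsets[i][0] + shift(i),
--              coreference_offsets[i][1] + shift(i + 1)]
--             for i in range(n)]
-- ===== Notes on version B (the rewrite author's own statement) =====
-- stated objective: alternative
-- what changed: Replaces A's stateful scan with a running cumulative_offset by a stateless closed form: each output row is computed independently as offsets[i] shifted by the total word count of updated_words[:k] minus original_words[:k] (k = i and i+1), recomputed from slices per index (O(n^2) vs A's O(n)).
import Mathlib
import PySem

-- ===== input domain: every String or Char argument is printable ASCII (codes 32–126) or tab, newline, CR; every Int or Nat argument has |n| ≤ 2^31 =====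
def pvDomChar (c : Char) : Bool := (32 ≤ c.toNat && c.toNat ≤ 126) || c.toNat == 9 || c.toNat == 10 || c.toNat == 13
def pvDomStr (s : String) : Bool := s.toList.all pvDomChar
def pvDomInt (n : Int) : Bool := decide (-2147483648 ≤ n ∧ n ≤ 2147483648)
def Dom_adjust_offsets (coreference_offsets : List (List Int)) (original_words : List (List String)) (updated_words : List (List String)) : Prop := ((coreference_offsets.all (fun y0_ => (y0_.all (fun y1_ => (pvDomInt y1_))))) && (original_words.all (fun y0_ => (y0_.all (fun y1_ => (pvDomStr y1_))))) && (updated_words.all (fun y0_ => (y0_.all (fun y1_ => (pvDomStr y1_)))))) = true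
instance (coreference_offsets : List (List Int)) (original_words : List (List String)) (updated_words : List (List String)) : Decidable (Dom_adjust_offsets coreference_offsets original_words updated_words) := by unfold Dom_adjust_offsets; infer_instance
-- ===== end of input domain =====

-- B replaces A's stateful scan (running cumulative_offset) by a stateless closed form that
-- recomputes each shift from slices; alternative decomposition, O(n^2) instead of O(n).

-- ===== PORT A =====
-- loop over enumerate(zip(original_words, updated_words)) with running cumulative_offset;
-- coreference_offsets[i] is pyGet?; an out-of-range index or a row that does not unpack
-- into exactly two items raises in Python (excluded by Pre_), the port stops with [] there.
def adjAAux (co : List (List Int)) : List (List String × List String) → Nat → Int → List (List Int)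
  | [], _, _ => []
  | (o, u) :: rest, i, cum =>
    let added : Int := (u.length : Int) - (o.length : Int)
    match PySem.List.pyGet? co (i : Int) with
    | some [s, e] => [s + cum, e + cum + added] :: adjAAux co rest (i + 1) (cum + added)
    | _ => []

def adjust_offsets (coreference_offsets : List (List Int)) (original_words : List (List String)) (updated_words : List (List String)) : List (List Int) :=
  adjAAux coreference_offsets (original_words.zip updated_words) 0 0

-- ===== PORT B =====
-- Source B's shift(k): sum of lengths over the slices updated_words[:k] and original_words[:k]
def pvShift (original_words updated_words : List (List String)) (k : Int) : Int :=
  ((PySem.List.slice updated_words none (some k)).map (fun u => (u.length : Int))).sum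
  - ((PySem.List.slice original_words none (some k)).map (fun o => (o.length : Int))).sum

-- comprehension over range(n); coreference_offsets[i][0]/[1] via pyGet?/pyGetD — the
-- defaults are only reached where Python raises (outside Pre_).
def adjust_offsets_alt (coreference_offsets : List (List Int)) (original_words : List (List String)) (updated_words : List (List String)) : List (List Int) :=
  let n := min original_words.length updated_words.length
  (List.range n).map (fun (i : Nat) =>
    let row := (PySem.List.pyGet? coreference_offsets (i : Int)).getD []
    [PySem.List.pyGetD row 0 0 + pvShift original_words updated_words (i : Int),
     PySem.List.pyGetD row 1 0 + pvShift original_words updated_words ((i : Int) + 1)])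

-- ===== PRECONDITION & SPEC =====
-- Pre_ is exactly A's normal domain: for each of the min(len original, len updated)
-- iterations, coreference_offsets[i] must exist (else IndexError) and hold exactly two
-- items (else ValueError on unpacking).
def Pre_adjust_offsets (coreference_offsets : List (List Int)) (original_words : List (List String)) (updated_words : List (List String)) : Prop :=
  min original_words.length updated_words.length ≤ coreference_offsets.length ∧
  ∀ row ∈ coreference_offsets.take (min original_words.length updated_words.length), row.length = 2
instance (coreference_offsets : List (List Int)) (original_words : List (List String)) (updated_words : List (List String)) : Decidable (Pre_adjust_offsets coreference_offsets original_words updated_words) := by unfold Pre_adjust_offsets; infer_instance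

def pvWitness_adjust_offsets : List (List Int) × List (List String) × List (List String) :=
  ([[0, 1], [3, 4]], [["a"], ["b", "c"]], [["a", "x"], ["b"]])

def Spec_adjust_offsets (coreference_offsets : List (List Int)) (original_words : List (List String)) (updated_words : List (List String)) (out : List (List Int)) : Prop := out = adjust_offsets_alt coreference_offsets original_words updated_words
instance (coreference_offsets : List (List Int)) (original_words : List (List String)) (updated_words : List (List String)) (out : List (List Int)) : Decidable (Spec_adjust_offsets coreference_offsets original_words updated_words out) := by unfold Spec_adjust_offsets; infer_instance

-- ===== CLAIM (what is proved, stated in full; the proofs are below) =====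
def Claim_equal_adjust_offsets : Prop := ∀ (coreference_offsets : List (List Int)) (original_words : List (List String)) (updated_words : List (List String)), Dom_adjust_offsets coreference_offsets original_words updated_words → Pre_adjust_offsets coreference_offsets original_words updated_words → Spec_adjust_offsets coreference_offsets original_words updated_words (adjust_offsets coreference_offsets original_words updated_words)

-- ===== LEMMAS AND PROOFS =====

-- the per-pair length difference of A's loop, len(updated) - len(original)
def pvDiff (p : List String × List String) : Int := (p.2.length : Int) - (p.1.length : Int)

-- A's loop unrolled into a map over indices carrying the take-sum of diffs
lemma adjAAux_eq_map (co : List (List Int)) :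
    ∀ (ps : List (List String × List String)) (i : Nat) (cum : Int),
    (∀ j, j < ps.length → ∃ s e : Int, PySem.List.pyGet? co ((i + j : Nat) : Int) = some [s, e]) →
    adjAAux co ps i cum =
      (List.range ps.length).map (fun j =>
        let row := (PySem.List.pyGet? co ((i + j : Nat) : Int)).getD []
        [PySem.List.pyGetD row 0 0 + (cum + ((ps.map pvDiff).take j).sum),
         PySem.List.pyGetD row 1 0 + (cum + ((ps.map pvDiff).take (j + 1)).sum)]) := by
  intro ps
  induction ps with
  | nil => intro i cum _; simp [adjAAux]
  | cons p rest ih =>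
    intro i cum h
    obtain ⟨o, u⟩ := p
    obtain ⟨s, e, hse⟩ := h 0 (by simp)
    rw [Nat.add_zero] at hse
    simp only [adjAAux, hse]
    rw [List.length_cons, List.range_succ_eq_map, List.map_cons, List.map_map]
    congr 1
    · simp only [Nat.add_zero, hse, Option.getD_some, List.map_cons, List.take_zero,
        List.take_succ_cons, List.sum_cons, List.sum_nil]
      simp [pysem, pvDiff]
      ring
    · rw [ih (i + 1) (cum + ((u.length : Int) - (o.length : Int)))
        (by intro j hj
            have := h (j + 1) (by simpa using hj)
            rwa [show i + (j + 1) = i + 1 + j by omega] at this)]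
      apply List.map_congr_left
      intro j hj
      simp only [Function.comp, Nat.succ_eq_add_one]
      rw [show i + 1 + j = i + (j + 1) by omega]
      simp only [List.map_cons, List.take_succ_cons, List.sum_cons, pvDiff,
        List.cons.injEq, and_true]
      exact ⟨by ring, by ring⟩

-- the sum of diffs over a zip is the difference of the two length sums
lemma zip_diff_sum : ∀ (a b : List (List String)), a.length = b.length →
    ((a.zip b).map pvDiff).sum
      = (b.map (fun u => (u.length : Int))).sum - (a.map (fun o => (o.length : Int))).sum := by
  intro a
  induction a with
  | nil =>
    intro b h
    cases b with
    | nil => simp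
    | cons y ys => simp at h
  | cons x xs ih =>
    intro b h
    cases b with
    | nil => simp at h
    | cons y ys =>
      simp only [List.zip_cons_cons, List.map_cons, List.sum_cons, pvDiff]
      rw [ih ys (by simpa using h)]
      ring

-- a take-sum of diffs equals B's pvShift (for k within both lists)
lemma take_diff_sum_eq_shift (ow uw : List (List String)) (k : Nat)
    (h : k ≤ min ow.length uw.length) :
    (((ow.zip uw).map pvDiff).take k).sum = pvShift ow uw (k : Nat) := by
  have h1 : (((ow.zip uw).map pvDiff).take k) = ((ow.take k).zip (uw.take k)).map pvDiff := by
    rw [← List.map_take]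
    congr 1
    simp [List.zip, List.take_zipWith]
  rw [h1, zip_diff_sum (ow.take k) (uw.take k) (by simp; omega)]
  unfold pvShift
  rw [PySem.List.slice_to_natCast, PySem.List.slice_to_natCast]

-- ===== VERDICT (by name: the statement is the Claim_ definition above) =====
theorem adjust_offsets_spec : Claim_equal_adjust_offsets := by
  intro co ow uw _ hpre
  obtain ⟨hlen, hrows⟩ := hpre
  unfold Spec_adjust_offsets adjust_offsets
  simp only [adjust_offsets_alt]
  set ps := ow.zip uw with hps
  have hpslen : ps.length = min ow.length uw.length := by simp [hps]
  have hget : ∀ j, j < ps.length → ∃ s e : Int, PySem.List.pyGet? co ((0 + j : Nat) : Int) = some [s, e] := by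
    intro j hj
    have hjco : j < co.length := by omega
    have hmem : co[j] ∈ co.take ps.length := by
      have : (co.take ps.length)[j]'(by simp; omega) = co[j] := List.getElem_take
      rw [← this]; exact List.getElem_mem _
    have h2 : co[j].length = 2 := by
      apply hrows; rw [← hpslen]; exact hmem
    obtain ⟨s, e, hrow⟩ := List.length_eq_two.mp h2
    refine ⟨s, e, ?_⟩
    simp only [Nat.zero_add, PySem.List.pyGet?_natCast]
    rw [List.getElem?_eq_getElem hjco, hrow]
  rw [adjAAux_eq_map co ps 0 0 hget]
  rw [← hpslen]
  apply List.map_congr_left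
  intro j hj
  have hjlt : j < ps.length := List.mem_range.mp hj
  have hj1 : j ≤ min ow.length uw.length := by omega
  have hj2 : j + 1 ≤ min ow.length uw.length := by omega
  have e1 := take_diff_sum_eq_shift ow uw j hj1
  have e2 := take_diff_sum_eq_shift ow uw (j + 1) hj2
  rw [← hps] at e1 e2
  simp only [e1, e2, zero_add]
  have : ((j : Int) + 1) = ((j + 1 : Nat) : Int) := by push_cast; ring
  rw [this]
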